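-- pv_equiv track=rewrite | github.com/vincentomics/matrixTest | run_perf_tables.py | get_test_names
-- ===== SOURCE A (Python) =====
-- from typing import Dict, List, Tuple, Optional
--
-- def get_test_names(all_data: Dict) -> List[str]:
--     """Get consistent test names across all languages."""
--     test_names = set()
--     for language_data in all_data.values():
--         test_names.update(language_data.keys())
--
--     # Sort by size (tiny, small, medium, large)
--     size_order = ['tiny', 'small', 'medium', 'large']
--     sorted_tests = []
--
--     for size in size_order:
--         for test_name in sorted(test_names):
--             if size in test_name.lower() and test_name not in sorted_tests:
--                 sorted_tests.append(test_name)
--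
--     # Add any remaining tests
--     for test_name in sorted(test_names):
--         if test_name not in sorted_tests:
--             sorted_tests.append(test_name)
--
--     return sorted_tests
-- ===== SOURCE B (Python) =====
-- from typing import Dict, List
--
-- def get_test_names(all_data: Dict) -> List[str]:
--     """Get consistent test names across all languages."""
--     test_names = set()
--     for language_data in all_data.values():
--         test_names.update(language_data.keys())
--
--     size_order = ['tiny', 'small', 'medium', 'large']
--
--     def bucket(name):
--         low = name.lower()
--         i = 0
--         for size in size_order:
--             if size in low:
--                 return i
--             i += 1
--         return i
--
--     return sorted(test_names, key=lambda n: (bucket(n), n))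
-- ===== Notes on version B (the rewrite author's own statement) =====
-- stated objective: faster
-- what changed: Replaces the four guarded rescans of the name list plus a leftover pass (each with a linear 'not in sorted_tests' membership scan) by a single key-based sort: each name gets a bucket index (first matching size word, or past-the-end) and the result is one sorted(names, key=(bucket, name)).
import Mathlib
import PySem

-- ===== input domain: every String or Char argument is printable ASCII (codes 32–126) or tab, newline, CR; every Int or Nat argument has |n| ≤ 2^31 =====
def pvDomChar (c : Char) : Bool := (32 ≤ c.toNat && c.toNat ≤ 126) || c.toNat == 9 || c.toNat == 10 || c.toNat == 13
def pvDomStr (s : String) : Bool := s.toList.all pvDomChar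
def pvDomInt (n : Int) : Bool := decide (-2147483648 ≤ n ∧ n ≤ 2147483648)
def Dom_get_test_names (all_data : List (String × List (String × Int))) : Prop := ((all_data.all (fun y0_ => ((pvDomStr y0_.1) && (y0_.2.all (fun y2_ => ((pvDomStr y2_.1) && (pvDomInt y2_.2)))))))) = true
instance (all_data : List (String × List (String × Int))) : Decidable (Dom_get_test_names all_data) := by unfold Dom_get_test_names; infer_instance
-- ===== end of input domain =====

-- B replaces A's four guarded rescans plus a leftover pass by one key-based sort (bucket index, then name).

-- ===== PORT A =====
def get_test_names (all_data : List (String × List (String × Int))) : List String :=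
  let test_names : PySem.Set String :=
    (all_data.map (fun y => y.2)).foldl
      (fun s language_data => PySem.Set.update s (language_data.map (fun y => y.1))) PySem.Set.empty
  let size_order : List String := ["tiny", "small", "medium", "large"]
  let sorted_tests : List String :=
    size_order.foldl (fun st size =>
      (PySem.List.sorted test_names (fun x => x) false).foldl
        (fun st2 tn =>
          if PySem.Str.isIn size (PySem.Str.lower tn) && !(st2.contains tn) then st2 ++ [tn] else st2)
        st) []
  (PySem.List.sorted test_names (fun x => x) false).foldl
    (fun st tn => if !(st.contains tn) then st ++ [tn] else st) sorted_tests

-- ===== PORT B =====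
-- bucket's for-loop with early return, as structural recursion over size_order
def pvBucketLoop (low : String) (i : Int) : List String → Int
  | [] => i
  | size :: rest => if PySem.Str.isIn size low then i else pvBucketLoop low (i + 1) rest

def get_test_names_alt (all_data : List (String × List (String × Int))) : List String :=
  let test_names : PySem.Set String :=
    (all_data.map (fun y => y.2)).foldl
      (fun s language_data => PySem.Set.update s (language_data.map (fun y => y.1))) PySem.Set.empty
  let size_order : List String := ["tiny", "small", "medium", "large"]
  PySem.List.sorted2 test_names
    (fun n => pvBucketLoop (PySem.Str.lower n) 0 size_order) (fun n => n) false

-- ===== PRECONDITION & SPEC =====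
def Spec_get_test_names (all_data : List (String × List (String × Int))) (out : List String) : Prop := out = get_test_names_alt all_data
instance (all_data : List (String × List (String × Int))) (out : List String) : Decidable (Spec_get_test_names all_data out) := by unfold Spec_get_test_names; infer_instance

-- ===== CLAIM (what is proved, stated in full; the proofs are below) =====
def Claim_equal_get_test_names : Prop := ∀ (all_data : List (String × List (String × Int))), Dom_get_test_names all_data → Spec_get_test_names all_data (get_test_names all_data)

-- ===== LEMMAS AND PROOFS =====

-- q s n : the size word s occurs in n.lower()
def pvQ (size n : String) : Bool := PySem.Str.isIn size (PySem.Str.lower n)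

-- the five bucket predicates (bucket = 0,1,2,3,4)
def pvB0 : String → Bool := fun n => pvQ "tiny" n
def pvB1 : String → Bool := fun n => pvQ "small" n && !pvQ "tiny" n
def pvB2 : String → Bool := fun n => (pvQ "medium" n && !pvQ "small" n) && !pvQ "tiny" n
def pvB3 : String → Bool := fun n => ((pvQ "large" n && !pvQ "medium" n) && !pvQ "small" n) && !pvQ "tiny" n
def pvB4 : String → Bool := fun n => ((!pvQ "large" n && !pvQ "medium" n) && !pvQ "small" n) && !pvQ "tiny" n

def pvF (b : String → Bool) (S : List String) : List String :=
  (PySem.List.sorted S (fun x => x) false).filter b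

lemma pvBucketLoop_unfold (n : String) :
    pvBucketLoop (PySem.Str.lower n) 0 ["tiny", "small", "medium", "large"] =
      if pvQ "tiny" n then 0 else if pvQ "small" n then 1 else if pvQ "medium" n then 2
      else if pvQ "large" n then 3 else 4 := by
  simp only [pvBucketLoop, pvQ]
  norm_num

lemma pvBucket_B0 {n : String} (h : pvB0 n = true) :
    pvBucketLoop (PySem.Str.lower n) 0 ["tiny", "small", "medium", "large"] = 0 := by
  rw [pvBucketLoop_unfold]; simp only [pvB0] at h; simp [h]

lemma pvBucket_B1 {n : String} (h : pvB1 n = true) :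
    pvBucketLoop (PySem.Str.lower n) 0 ["tiny", "small", "medium", "large"] = 1 := by
  rw [pvBucketLoop_unfold]; simp only [pvB1, Bool.and_eq_true, Bool.not_eq_true'] at h
  simp [h.1, h.2]

lemma pvBucket_B2 {n : String} (h : pvB2 n = true) :
    pvBucketLoop (PySem.Str.lower n) 0 ["tiny", "small", "medium", "large"] = 2 := by
  rw [pvBucketLoop_unfold]; simp only [pvB2, Bool.and_eq_true, Bool.not_eq_true'] at h
  simp [h.1.1, h.1.2, h.2]

lemma pvBucket_B3 {n : String} (h : pvB3 n = true) :
    pvBucketLoop (PySem.Str.lower n) 0 ["tiny", "small", "medium", "large"] = 3 := by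
  rw [pvBucketLoop_unfold]; simp only [pvB3, Bool.and_eq_true, Bool.not_eq_true'] at h
  simp [h.1.1.1, h.1.1.2, h.1.2, h.2]

lemma pvBucket_B4 {n : String} (h : pvB4 n = true) :
    pvBucketLoop (PySem.Str.lower n) 0 ["tiny", "small", "medium", "large"] = 4 := by
  rw [pvBucketLoop_unfold]; simp only [pvB4, Bool.and_eq_true, Bool.not_eq_true'] at h
  simp [h.1.1.1, h.1.1.2, h.1.2, h.2]

-- A's append-if-unseen pass over a duplicate-free list
lemma pvFoldlMark (p : String → Bool) :
    ∀ (L acc0 : List String), L.Nodup →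
      L.foldl (fun acc tn => if p tn && !(acc.contains tn) then acc ++ [tn] else acc) acc0
        = acc0 ++ L.filter (fun tn => p tn && !(acc0.contains tn))
  | [], acc0, _ => by simp
  | x :: xs, acc0, h => by
    have hx : x ∉ xs := (List.nodup_cons.mp h).1
    have hxs : xs.Nodup := (List.nodup_cons.mp h).2
    have hcontains : ∀ tn ∈ xs, ((acc0 ++ [x]).contains tn) = (acc0.contains tn) := by
      intro tn htn
      have : tn ≠ x := fun he => hx (he ▸ htn)
      simp [List.contains_eq_mem, List.mem_append, this]
    by_cases hc : (p x && !(acc0.contains x)) = true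
    · rw [List.foldl_cons]
      rw [if_pos hc]
      rw [pvFoldlMark p xs (acc0 ++ [x]) hxs, List.filter_cons]
      simp only [hc, if_true, List.append_assoc, List.singleton_append]
      congr 1
      congr 1
      exact List.filter_congr (fun tn htn => by rw [hcontains tn htn])
    · rw [List.foldl_cons]
      rw [if_neg hc]
      have hc' : (p x && !acc0.contains x) = false := by
        revert hc; cases (p x && !acc0.contains x) <;> simp
      rw [pvFoldlMark p xs acc0 hxs, List.filter_cons]
      simp only [hc']
      simp

lemma pvNodupFoldlAdd : ∀ (xs : List String) (s : PySem.Set String), s.Nodup → (xs.foldl PySem.Set.add s).Nodup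
  | [], s, h => h
  | x :: xs, s, h => pvNodupFoldlAdd xs (s.add x) (PySem.Set.nodup_add s x h)

lemma pvNodupS : ∀ (ds : List (List (String × Int))) (s : PySem.Set String), s.Nodup →
    (ds.foldl (fun s ld => PySem.Set.update s (ld.map (fun y => y.1))) s).Nodup
  | [], s, h => h
  | _ :: ds, st, h => by
    apply pvNodupS ds
    simp only [PySem.Set.update]
    exact pvNodupFoldlAdd _ st h

lemma pvA_eq (S : List String) (hS : S.Nodup) :
    (PySem.List.sorted S (fun x => x) false).foldl
      (fun st tn => if !(st.contains tn) then st ++ [tn] else st)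
      ((["tiny", "small", "medium", "large"] : List String).foldl (fun st size =>
        (PySem.List.sorted S (fun x => x) false).foldl
          (fun st2 tn =>
            if PySem.Str.isIn size (PySem.Str.lower tn) && !(st2.contains tn) then st2 ++ [tn] else st2)
          st) [])
    = pvF pvB0 S ++ (pvF pvB1 S ++ (pvF pvB2 S ++ (pvF pvB3 S ++ pvF pvB4 S))) := by
  simp only [pvF]
  set L := PySem.List.sorted S (fun x => x) false with hLdef
  have hLnd : L.Nodup := ((PySem.List.sorted_perm S (fun x => x) false).nodup_iff).mpr hS
  have hmem1 : ∀ (b : String → Bool), ∀ tn ∈ L, (L.filter b).contains tn = b tn := by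
    intro b tn htn; simp [List.contains_eq_mem, List.mem_filter, htn]
  have hmem2 : ∀ tn ∈ L, ((L.filter pvB0 ++ L.filter pvB1).contains tn) = (pvB0 tn || pvB1 tn) := by
    intro tn htn; simp [List.contains_eq_mem, List.mem_append, List.mem_filter, htn]
  have hmem3 : ∀ tn ∈ L,
      (((L.filter pvB0 ++ L.filter pvB1) ++ L.filter pvB2).contains tn)
        = ((pvB0 tn || pvB1 tn) || pvB2 tn) := by
    intro tn htn; simp [List.contains_eq_mem, List.mem_append, List.mem_filter, htn, Bool.or_assoc]
  have hmem4 : ∀ tn ∈ L,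
      ((((L.filter pvB0 ++ L.filter pvB1) ++ L.filter pvB2) ++ L.filter pvB3).contains tn)
        = (((pvB0 tn || pvB1 tn) || pvB2 tn) || pvB3 tn) := by
    intro tn htn; simp [List.contains_eq_mem, List.mem_append, List.mem_filter, htn, Bool.or_assoc]
  have h0 : L.foldl (fun st2 tn =>
        if PySem.Str.isIn "tiny" (PySem.Str.lower tn) && !(st2.contains tn) then st2 ++ [tn] else st2) []
      = L.filter pvB0 := by
    rw [pvFoldlMark _ L [] hLnd, List.nil_append]
    exact List.filter_congr (fun tn _ => by simp [pvB0, pvQ])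
  have h1 : L.foldl (fun st2 tn =>
        if PySem.Str.isIn "small" (PySem.Str.lower tn) && !(st2.contains tn) then st2 ++ [tn] else st2)
        (L.filter pvB0)
      = L.filter pvB0 ++ L.filter pvB1 := by
    rw [pvFoldlMark _ L _ hLnd]
    congr 1
    refine List.filter_congr (fun tn htn => ?_)
    rw [hmem1 pvB0 tn htn]
    simp only [pvB0, pvB1, pvQ]
  have h2 : L.foldl (fun st2 tn =>
        if PySem.Str.isIn "medium" (PySem.Str.lower tn) && !(st2.contains tn) then st2 ++ [tn] else st2)
        (L.filter pvB0 ++ L.filter pvB1)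
      = (L.filter pvB0 ++ L.filter pvB1) ++ L.filter pvB2 := by
    rw [pvFoldlMark _ L _ hLnd]
    congr 1
    refine List.filter_congr (fun tn htn => ?_)
    rw [hmem2 tn htn]
    simp only [pvB0, pvB1, pvB2, pvQ]
    cases ht : PySem.Str.isIn "tiny" (PySem.Str.lower tn) <;>
      cases hs : PySem.Str.isIn "small" (PySem.Str.lower tn) <;>
        cases hm : PySem.Str.isIn "medium" (PySem.Str.lower tn) <;> rfl
  have h3 : L.foldl (fun st2 tn =>
        if PySem.Str.isIn "large" (PySem.Str.lower tn) && !(st2.contains tn) then st2 ++ [tn] else st2)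
        ((L.filter pvB0 ++ L.filter pvB1) ++ L.filter pvB2)
      = ((L.filter pvB0 ++ L.filter pvB1) ++ L.filter pvB2) ++ L.filter pvB3 := by
    rw [pvFoldlMark _ L _ hLnd]
    congr 1
    refine List.filter_congr (fun tn htn => ?_)
    rw [hmem3 tn htn]
    simp only [pvB0, pvB1, pvB2, pvB3, pvQ]
    cases ht : PySem.Str.isIn "tiny" (PySem.Str.lower tn) <;>
      cases hs : PySem.Str.isIn "small" (PySem.Str.lower tn) <;>
        cases hm : PySem.Str.isIn "medium" (PySem.Str.lower tn) <;>
          cases hl : PySem.Str.isIn "large" (PySem.Str.lower tn) <;> rfl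
  have h4 : L.foldl (fun st tn => if !(st.contains tn) then st ++ [tn] else st)
        (((L.filter pvB0 ++ L.filter pvB1) ++ L.filter pvB2) ++ L.filter pvB3)
      = (((L.filter pvB0 ++ L.filter pvB1) ++ L.filter pvB2) ++ L.filter pvB3) ++ L.filter pvB4 := by
    have := pvFoldlMark (fun _ => true) L
        ((((L.filter pvB0 ++ L.filter pvB1) ++ L.filter pvB2) ++ L.filter pvB3)) hLnd
    simp only [Bool.true_and] at this
    rw [this]
    congr 1
    refine List.filter_congr (fun tn htn => ?_)
    rw [hmem4 tn htn]
    simp only [pvB0, pvB1, pvB2, pvB3, pvB4, pvQ]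
    cases ht : PySem.Str.isIn "tiny" (PySem.Str.lower tn) <;>
      cases hs : PySem.Str.isIn "small" (PySem.Str.lower tn) <;>
        cases hm : PySem.Str.isIn "medium" (PySem.Str.lower tn) <;>
          cases hl : PySem.Str.isIn "large" (PySem.Str.lower tn) <;> rfl
  simp only [List.foldl_cons, List.foldl_nil]
  rw [h0, h1, h2, h3, h4]
  simp [List.append_assoc]

lemma pvSorted2_eq (S : List String) (k1 : String → Int) :
    PySem.List.sorted2 S k1 (fun n => n) false
      = PySem.List.sorted S (fun n => toLex (k1 n, n)) false := by
  rw [PySem.List.sorted_eq_foldl_insertBy]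
  simp only [PySem.List.sorted2]
  congr 1
  funext acc x
  congr 1
  funext a b
  rcases lt_trichotomy (k1 a) (k1 b) with h | h | h
  · simp [h, Prod.Lex.toLex_lt_toLex, h.not_gt]
  · simp [h, Prod.Lex.toLex_lt_toLex]
  · simp [h, Prod.Lex.toLex_lt_toLex, h.not_gt, h.ne']

lemma pvCountFilter (a : String) (p : String → Bool) (l : List String) :
    List.count a (l.filter p) = if p a then l.count a else 0 := by
  by_cases h : p a = true
  · simp [h, List.count_filter h]
  · have hnm : a ∉ l.filter p := fun hm => h (List.of_mem_filter hm)
    simp [h, List.count_eq_zero_of_not_mem hnm]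

lemma pvB_eq (S : List String) (hS : S.Nodup) :
    PySem.List.sorted2 S
      (fun n => pvBucketLoop (PySem.Str.lower n) 0 ["tiny", "small", "medium", "large"]) (fun n => n) false
    = pvF pvB0 S ++ (pvF pvB1 S ++ (pvF pvB2 S ++ (pvF pvB3 S ++ pvF pvB4 S))) := by
  rw [pvSorted2_eq]
  apply PySem.List.sorted_eq_of_perm_of_pairwise_lt
  · -- the concatenation of the five bucket blocks is a permutation of S
    simp only [pvF]
    refine List.Perm.trans ?_ (PySem.List.sorted_perm S (fun x => x) false)
    rw [List.perm_iff_count]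
    intro a
    simp only [List.count_append, pvCountFilter, pvB0, pvB1, pvB2, pvB3, pvB4]
    rcases Bool.dichotomy (pvQ "tiny" a) with ht | ht <;>
      rcases Bool.dichotomy (pvQ "small" a) with hs | hs <;>
        rcases Bool.dichotomy (pvQ "medium" a) with hm | hm <;>
          rcases Bool.dichotomy (pvQ "large" a) with hl | hl <;>
            simp [ht, hs, hm, hl]
  · -- the concatenation is strictly increasing under the (bucket, name) key
    simp only [pvF]
    set L := PySem.List.sorted S (fun x => x) false with hLdef
    have hle : L.Pairwise (fun a b => a ≤ b) := PySem.List.sorted_pairwise S (fun x => x)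
    have hLnd : L.Nodup := ((PySem.List.sorted_perm S (fun x => x) false).nodup_iff).mpr hS
    have hlt : L.Pairwise (fun a b => a < b) :=
      (hle.and hLnd).imp (fun h => lt_of_le_of_ne h.1 h.2)
    have hwi : ∀ (b : String → Bool) (i : Int),
        (∀ n, b n = true → pvBucketLoop (PySem.Str.lower n) 0 ["tiny", "small", "medium", "large"] = i) →
        (L.filter b).Pairwise (fun a c =>
          (toLex (pvBucketLoop (PySem.Str.lower a) 0 ["tiny", "small", "medium", "large"], a) : Lex (Int × String))
            < toLex (pvBucketLoop (PySem.Str.lower c) 0 ["tiny", "small", "medium", "large"], c)) := by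
      intro b i hb
      have hp : (L.filter b).Pairwise (fun a c => a < c) :=
        List.Pairwise.sublist List.filter_sublist hlt
      refine hp.imp_of_mem (fun {a c} ha hc hac => ?_)
      rw [Prod.Lex.toLex_lt_toLex]
      exact Or.inr ⟨by rw [hb a (List.of_mem_filter ha), hb c (List.of_mem_filter hc)], hac⟩
    have hcross : ∀ (b c : String → Bool) (i j : Int), i < j →
        (∀ n, b n = true → pvBucketLoop (PySem.Str.lower n) 0 ["tiny", "small", "medium", "large"] = i) →
        (∀ n, c n = true → pvBucketLoop (PySem.Str.lower n) 0 ["tiny", "small", "medium", "large"] = j) →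
        ∀ a ∈ L.filter b, ∀ x ∈ L.filter c,
          (toLex (pvBucketLoop (PySem.Str.lower a) 0 ["tiny", "small", "medium", "large"], a) : Lex (Int × String))
            < toLex (pvBucketLoop (PySem.Str.lower x) 0 ["tiny", "small", "medium", "large"], x) := by
      intro b c i j hij hb hc a ha x hx
      rw [Prod.Lex.toLex_lt_toLex]
      exact Or.inl (by rw [hb a (List.of_mem_filter ha), hc x (List.of_mem_filter hx)]; exact hij)
    have f0 := fun n h => pvBucket_B0 (n := n) h
    have f1 := fun n h => pvBucket_B1 (n := n) h
    have f2 := fun n h => pvBucket_B2 (n := n) h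
    have f3 := fun n h => pvBucket_B3 (n := n) h
    have f4 := fun n h => pvBucket_B4 (n := n) h
    refine List.pairwise_append.mpr ⟨hwi pvB0 0 f0, ?_, ?_⟩
    · refine List.pairwise_append.mpr ⟨hwi pvB1 1 f1, ?_, ?_⟩
      · refine List.pairwise_append.mpr ⟨hwi pvB2 2 f2, ?_, ?_⟩
        · refine List.pairwise_append.mpr ⟨hwi pvB3 3 f3, hwi pvB4 4 f4, ?_⟩
          exact hcross pvB3 pvB4 3 4 (by norm_num) f3 f4
        · intro a ha x hx
          rcases List.mem_append.mp hx with h | h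
          · exact hcross pvB2 pvB3 2 3 (by norm_num) f2 f3 a ha x h
          · exact hcross pvB2 pvB4 2 4 (by norm_num) f2 f4 a ha x h
      · intro a ha x hx
        rcases List.mem_append.mp hx with h | h
        · exact hcross pvB1 pvB2 1 2 (by norm_num) f1 f2 a ha x h
        rcases List.mem_append.mp h with h' | h'
        · exact hcross pvB1 pvB3 1 3 (by norm_num) f1 f3 a ha x h'
        · exact hcross pvB1 pvB4 1 4 (by norm_num) f1 f4 a ha x h'
    · intro a ha x hx
      rcases List.mem_append.mp hx with h | h
      · exact hcross pvB0 pvB1 0 1 (by norm_num) f0 f1 a ha x h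
      rcases List.mem_append.mp h with h' | h'
      · exact hcross pvB0 pvB2 0 2 (by norm_num) f0 f2 a ha x h'
      rcases List.mem_append.mp h' with h'' | h''
      · exact hcross pvB0 pvB3 0 3 (by norm_num) f0 f3 a ha x h''
      · exact hcross pvB0 pvB4 0 4 (by norm_num) f0 f4 a ha x h''

-- ===== VERDICT (by name: the statement is the Claim_ definition above) =====
theorem get_test_names_spec : Claim_equal_get_test_names := by
  intro all_data _
  unfold Spec_get_test_names
  show get_test_names all_data = get_test_names_alt all_data
  simp only [get_test_names, get_test_names_alt]
  generalize hX : (((all_data.map (fun y => y.2)).foldl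
      (fun s language_data => PySem.Set.update s (language_data.map (fun y => y.1))) PySem.Set.empty) : PySem.Set String) = S
  have hS : S.Nodup := by
    rw [← hX]
    exact pvNodupS _ _ (by simp [PySem.Set.empty])
  rw [pvA_eq S hS, pvB_eq S hS]
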